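-- pv_equiv track=rewrite | github.com/trackIT-Systems/tsconfig | app/routers/soundscapepipe.py | is_system_default_device
-- ===== SOURCE A (Python) =====
-- def is_system_default_device(device_name: str) -> bool:
--     """Check if a device is a system default/virtual device that should be filtered out."""
--     # Convert to lowercase for case-insensitive matching
--     name_lower = device_name.lower()
--
--     # List of system/virtual device names to exclude (using word boundaries for precision)
--     exact_matches = [
--         "default",
--         "sysdefault",
--         "dmix",
--         "pulse",
--         "pipewire",
--         "jack",
--         "iec958",
--         "spdif",
--         "surround40",
--         "surround51",
--         "surround71",
--         "front",
--         "rear",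
--         "center_lfe",
--         "/dev/dsp",  # OSS devices
--         "null",
--         "dummy",
--     ]
--
--     # Check for exact matches (device name exactly matches or starts with system name)
--     for sys_device in exact_matches:
--         if (
--             name_lower == sys_device
--             or name_lower.startswith(sys_device + " ")
--             or name_lower.startswith(sys_device + ":")
--         ):
--             return True
--
--     # Special case for HDMI devices - check if it's a generic HDMI output
--     if "hdmi" in name_lower and ("hw:" in name_lower or "alsa" in name_lower):
--         # Allow specific HDMI devices with meaningful names, filter generic ones
--         if name_lower.strip().endswith("hdmi") or "hdmi 0" in name_lower or "hdmi 1" in name_lower: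
--             return True
--
--     return False
-- ===== SOURCE B (Python) =====
-- SYSTEM_NAMES = frozenset([
--     "default", "sysdefault", "dmix", "pulse", "pipewire", "jack",
--     "iec958", "spdif", "surround40", "surround51", "surround71",
--     "front", "rear", "center_lfe", "/dev/dsp", "null", "dummy",
-- ])
--
--
-- def _is_generic_hdmi(s):
--     """Generic HDMI output: HDMI on an ALSA/hw backend without a meaningful name."""
--     return ("hdmi" in s and ("hw:" in s or "alsa" in s)
--             and (s.strip().endswith("hdmi") or "hdmi 0" in s or "hdmi 1" in s))
--
--
-- def is_system_default_device(device_name: str) -> bool: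
--     """Check if a device is a system default/virtual device that should be filtered out."""
--     s = device_name.lower()
--     # leading token: scan to the first ' ' or ':' (whole string if neither occurs)
--     i = 0
--     while i < len(s) and s[i] != " " and s[i] != ":":
--         i += 1
--     return s[:i] in SYSTEM_NAMES or _is_generic_hdmi(s)
-- ===== Notes on version B (the rewrite author's own statement) =====
-- stated objective: simpler
-- what changed: Instead of A's 17-iteration scan with three string comparisons per name, B extracts the leading token (the prefix before the first ' ' or ':') in one character scan and tests membership in a frozenset; the result is a single boolean expression (token-in-set or generic-HDMI) rather than A's early-return loop plus nested ifs.
import Mathlib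
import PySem

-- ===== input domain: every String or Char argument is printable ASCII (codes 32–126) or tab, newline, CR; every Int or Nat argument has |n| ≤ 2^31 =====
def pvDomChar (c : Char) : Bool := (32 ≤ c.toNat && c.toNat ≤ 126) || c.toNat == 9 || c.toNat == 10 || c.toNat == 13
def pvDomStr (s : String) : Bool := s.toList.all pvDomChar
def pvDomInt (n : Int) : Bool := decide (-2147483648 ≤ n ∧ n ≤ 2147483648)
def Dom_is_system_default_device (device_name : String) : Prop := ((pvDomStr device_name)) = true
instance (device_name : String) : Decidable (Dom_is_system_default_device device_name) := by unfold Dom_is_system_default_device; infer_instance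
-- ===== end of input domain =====

-- B extracts the leading token (prefix before the first ' ' or ':') in one scan and looks it
-- up in a set, returning one boolean disjunction, instead of A's early-return loop over 17
-- names (three comparisons each) followed by nested ifs.

-- ===== PORT A =====
def pvExactMatches : List String :=
  ["default", "sysdefault", "dmix", "pulse", "pipewire", "jack", "iec958", "spdif",
   "surround40", "surround51", "surround71", "front", "rear", "center_lfe",
   "/dev/dsp", "null", "dummy"]

-- 'for sys_device in exact_matches: if … : return True' as an early-return loop
def pvScanA (name_lower : String) : List String → Bool
  | [] => false
  | sys_device :: rest =>
    if name_lower == sys_device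
       || PySem.Str.startswith name_lower (sys_device ++ " ")
       || PySem.Str.startswith name_lower (sys_device ++ ":") then true
    else pvScanA name_lower rest

def is_system_default_device (device_name : String) : Bool :=
  let name_lower := PySem.Str.lower device_name
  if pvScanA name_lower pvExactMatches then true
  else if PySem.Str.isIn "hdmi" name_lower
          && (PySem.Str.isIn "hw:" name_lower || PySem.Str.isIn "alsa" name_lower) then
    if PySem.Str.endswith (PySem.Str.strip name_lower) "hdmi"
       || PySem.Str.isIn "hdmi 0" name_lower || PySem.Str.isIn "hdmi 1" name_lower then true
    else false
  else false

-- ===== PORT B =====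
def pvSystemNames : PySem.Set String :=
  PySem.Set.ofList
    ["default", "sysdefault", "dmix", "pulse", "pipewire", "jack", "iec958", "spdif",
     "surround40", "surround51", "surround71", "front", "rear", "center_lfe",
     "/dev/dsp", "null", "dummy"]

def pvIsGenericHdmi (s : String) : Bool :=
  PySem.Str.isIn "hdmi" s && (PySem.Str.isIn "hw:" s || PySem.Str.isIn "alsa" s)
    && (PySem.Str.endswith (PySem.Str.strip s) "hdmi"
        || PySem.Str.isIn "hdmi 0" s || PySem.Str.isIn "hdmi 1" s)

def is_system_default_device_alt (device_name : String) : Bool :=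
  let s := PySem.Str.lower device_name
  -- Source B's 'while i < len(s) and s[i] != " " and s[i] != ":"' scan is the takeWhile below
  PySem.Set.contains pvSystemNames
      (String.ofList (s.toList.takeWhile (fun c => !(c == ' ' || c == ':'))))
    || pvIsGenericHdmi s

-- ===== PRECONDITION & SPEC =====
def Spec_is_system_default_device (device_name : String) (out : Bool) : Prop := out = is_system_default_device_alt device_name
instance (device_name : String) (out : Bool) : Decidable (Spec_is_system_default_device device_name out) := by unfold Spec_is_system_default_device; infer_instance

-- ===== CLAIM (what is proved, stated in full; the proofs are below) =====
def Claim_equal_is_system_default_device : Prop := ∀ (device_name : String), Dom_is_system_default_device device_name → Spec_is_system_default_device device_name (is_system_default_device device_name)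

-- ===== LEMMAS AND PROOFS =====

-- proof-only clean recursion for the leading token
def pvToken : List Char → List Char
  | [] => []
  | c :: r => if c = ' ' ∨ c = ':' then [] else c :: pvToken r

theorem pvTakeWhile_eq_pvToken (s : List Char) :
    s.takeWhile (fun c => !(c == ' ' || c == ':')) = pvToken s := by
  induction s with
  | nil => rfl
  | cons c r ih =>
    by_cases h : c = ' ' ∨ c = ':'
    · rcases h with h | h <;> subst h <;> simp [pvToken, List.takeWhile_cons]
    · rw [not_or] at h
      simp only [List.takeWhile_cons]
      rw [if_pos (by simp [h.1, h.2]), ih, pvToken, if_neg (not_or.mpr h)]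

-- For a delimiter-free name t, A's three-way check equals 'leading token = t'.
theorem pvCheck_core (t s : List Char) (ht : ∀ c ∈ t, ¬(c = ' ' ∨ c = ':')) :
    (s = t ∨ (t ++ [' ']) <+: s ∨ (t ++ [':']) <+: s) ↔ pvToken s = t := by
  induction t generalizing s with
  | nil =>
    cases s with
    | nil => simp [pvToken]
    | cons c r =>
      by_cases hd : c = ' ' ∨ c = ':'
      · rcases hd with h | h <;> subst h <;> simp [pvToken, List.cons_prefix_cons]
      · rw [not_or] at hd
        simp only [pvToken, if_neg (not_or.mpr hd), List.nil_append, List.cons_prefix_cons]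
        simp [Ne.symm hd.1, Ne.symm hd.2]
  | cons a t' ih =>
    have ha : ¬(a = ' ' ∨ a = ':') := ht a (List.mem_cons_self ..)
    have ht' : ∀ c ∈ t', ¬(c = ' ' ∨ c = ':') := fun c hc => ht c (List.mem_cons_of_mem _ hc)
    cases s with
    | nil => simp [pvToken]
    | cons c r =>
      by_cases hca : c = a
      · subst hca
        show _ ↔ (if c = ' ' ∨ c = ':' then [] else c :: pvToken r) = c :: t'
        rw [if_neg ha]
        simp only [List.cons_append, List.cons_prefix_cons, List.cons.injEq, true_and]
        exact ih r ht'
      · constructor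
        · simp only [List.cons_append, List.cons_prefix_cons, List.cons.injEq]
          rintro (⟨h, -⟩ | ⟨h, -⟩ | ⟨h, -⟩)
          · exact absurd h hca
          · exact absurd h.symm hca
          · exact absurd h.symm hca
        · intro h
          exfalso
          rw [show pvToken (c :: r) = if c = ' ' ∨ c = ':' then [] else c :: pvToken r from rfl] at h
          split at h
          · simp at h
          · exact hca (List.cons.injEq .. ▸ h).1

-- Boolean/String form of the core lemma
theorem pvCheck_eq (t : String) (ht : (t.toList.all (fun c => !(c == ' ' || c == ':'))) = true) (s : String) :
    (s == t || PySem.Str.startswith s (t ++ " ") || PySem.Str.startswith s (t ++ ":"))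
      = (String.ofList (pvToken s.toList) == t) := by
  have ht' : ∀ c ∈ t.toList, ¬(c = ' ' ∨ c = ':') := by
    intro c hc
    have h2 := List.all_eq_true.mp ht c hc
    simp at h2
    tauto
  have h := pvCheck_core t.toList s.toList ht'
  rcases hb : (String.ofList (pvToken s.toList) == t) with _ | _
  · simp only [beq_eq_false_iff_ne, ne_eq] at hb
    have hne : pvToken s.toList ≠ t.toList := fun hh => hb (by
      rw [hh]; exact String.ofList_toList)
    simp only [Bool.or_eq_false_iff, beq_eq_false_iff_ne, ne_eq]
    refine ⟨⟨fun hst => ?_, ?_⟩, ?_⟩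
    · exact hne (h.mp (Or.inl (by rw [hst])))
    · rw [Bool.eq_false_iff, ne_eq, PySem.Str.startswith_eq, PySem.Chars.startswith_iff]
      intro hp
      exact hne (h.mp (Or.inr (Or.inl (by simpa using hp))))
    · rw [Bool.eq_false_iff, ne_eq, PySem.Str.startswith_eq, PySem.Chars.startswith_iff]
      intro hp
      exact hne (h.mp (Or.inr (Or.inr (by simpa using hp))))
  · have htok : pvToken s.toList = t.toList := by
      have hh := congrArg String.toList ((beq_iff_eq ..).mp hb)
      rw [String.toList_ofList] at hh
      exact hh
    rcases h.mpr htok with hc | hc | hc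
    · simp [show s = t from String.ext_iff.mpr hc]
    · have hs : PySem.Chars.startswith s.toList (t.toList ++ [' ']) = true :=
        (PySem.Chars.startswith_iff _ _).mpr hc
      simp [hs]
    · have hs : PySem.Chars.startswith s.toList (t.toList ++ [':']) = true :=
        (PySem.Chars.startswith_iff _ _).mpr hc
      simp [hs]

-- A's early-return loop is the corresponding List.any
theorem pvScanA_eq_any (s : String) (l : List String) :
    pvScanA s l = l.any (fun t =>
        s == t || PySem.Str.startswith s (t ++ " ") || PySem.Str.startswith s (t ++ ":")) := by
  induction l with
  | nil => rfl
  | cons t rest ih =>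
    rw [pvScanA, List.any_cons, ih]
    split <;> simp_all

-- The 17-name loop equals the set lookup of the leading token.
theorem pvLoop_eq (s : String) :
    pvScanA s pvExactMatches
      = PySem.Set.contains pvSystemNames (String.ofList (pvToken s.toList)) := by
  have hset : pvSystemNames = pvExactMatches := by decide
  rw [pvScanA_eq_any, hset]
  simp only [pvExactMatches, List.any_cons, List.any_nil]
  rw [pvCheck_eq "default" (by decide) s]
  rw [pvCheck_eq "sysdefault" (by decide) s]
  rw [pvCheck_eq "dmix" (by decide) s]
  rw [pvCheck_eq "pulse" (by decide) s]
  rw [pvCheck_eq "pipewire" (by decide) s]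
  rw [pvCheck_eq "jack" (by decide) s]
  rw [pvCheck_eq "iec958" (by decide) s]
  rw [pvCheck_eq "spdif" (by decide) s]
  rw [pvCheck_eq "surround40" (by decide) s]
  rw [pvCheck_eq "surround51" (by decide) s]
  rw [pvCheck_eq "surround71" (by decide) s]
  rw [pvCheck_eq "front" (by decide) s]
  rw [pvCheck_eq "rear" (by decide) s]
  rw [pvCheck_eq "center_lfe" (by decide) s]
  rw [pvCheck_eq "/dev/dsp" (by decide) s]
  rw [pvCheck_eq "null" (by decide) s]
  rw [pvCheck_eq "dummy" (by decide) s]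
  simp only [PySem.Set.contains, List.contains_cons, List.contains_nil, Bool.or_false]

-- ===== VERDICT (by name: the statement is the Claim_ definition above) =====
theorem is_system_default_device_spec : Claim_equal_is_system_default_device := by
  intro device_name _
  unfold Spec_is_system_default_device
  simp only [is_system_default_device, is_system_default_device_alt, pvIsGenericHdmi,
    pvTakeWhile_eq_pvToken, pvLoop_eq]
  split_ifs with h1 h2 h3 <;> simp_all [Bool.and_assoc]
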